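-- pv_equiv track=rewrite | github.com/benquick123/code-profiling | code/batch-2/vse-naloge-brez-testov/DN7-M-209.py | varen_premik
-- ===== SOURCE A (Python) =====
-- def varen_premik(x0, y0, x1, y1, mine):
--     polja_vmes = []
--     if x0 == x1:
--         vecji = max(y0,y1)
--         manjsi = min(y0,y1)
--         while manjsi <= vecji:
--             polja_vmes.append((x0,manjsi))
--             manjsi += 1
--     elif y0 == y1:
--         vecji = max(x0,x1)
--         manjsi = min(x0,x1)
--         while manjsi <= vecji:
--             polja_vmes.append((manjsi,y0))
--             manjsi += 1
--     for polje in polja_vmes: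
--         if polje in mine:
--             return False
--     return True
-- ===== SOURCE B (Python) =====
-- def varen_premik(x0, y0, x1, y1, mine):
--     if x0 == x1:
--         lo, hi = min(y0, y1), max(y0, y1)
--         return not any(m[0] == x0 and lo <= m[1] <= hi for m in mine)
--     elif y0 == y1:
--         lo, hi = min(x0, x1), max(x0, x1)
--         return not any(m[1] == y0 and lo <= m[0] <= hi for m in mine)
--     else:
--         return True
-- ===== Notes on version B (the rewrite author's own statement) =====
-- stated objective: faster
-- what changed: Instead of materialising the list of path cells and testing each against mine with 'in' (O(path*|mine|)), B scans mine once and tests each mine by an interval comparison, with no intermediate list.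
import Mathlib
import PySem

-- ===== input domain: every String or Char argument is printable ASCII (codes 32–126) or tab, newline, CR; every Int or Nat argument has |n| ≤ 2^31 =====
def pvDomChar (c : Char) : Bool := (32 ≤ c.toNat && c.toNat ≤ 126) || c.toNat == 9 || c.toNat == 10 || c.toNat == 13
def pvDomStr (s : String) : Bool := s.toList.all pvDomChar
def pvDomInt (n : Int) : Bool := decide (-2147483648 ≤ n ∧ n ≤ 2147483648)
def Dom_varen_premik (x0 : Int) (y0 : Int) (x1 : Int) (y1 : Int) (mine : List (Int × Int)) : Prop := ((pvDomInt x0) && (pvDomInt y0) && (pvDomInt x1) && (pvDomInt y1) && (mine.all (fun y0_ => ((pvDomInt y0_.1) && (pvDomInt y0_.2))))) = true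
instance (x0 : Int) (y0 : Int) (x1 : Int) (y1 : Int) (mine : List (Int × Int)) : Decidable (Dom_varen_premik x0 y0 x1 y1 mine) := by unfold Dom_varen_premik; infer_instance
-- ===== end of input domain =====

-- B scans mine once with an interval test instead of building the list of path cells
-- and testing each cell's membership in mine; no intermediate list is built.
-- ===== PORT A =====
def pathCells (x : Int) (manjsi vecji : Int) (horiz : Bool) : List (Int × Int) :=
  if _h : manjsi ≤ vecji then
    (if horiz then (manjsi, x) else (x, manjsi)) :: pathCells x (manjsi + 1) vecji horiz
  else []
termination_by (vecji + 1 - manjsi).toNat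
decreasing_by omega

def varen_premik (x0 : Int) (y0 : Int) (x1 : Int) (y1 : Int) (mine : List (Int × Int)) : Bool :=
  let polja_vmes : List (Int × Int) :=
    if x0 == x1 then pathCells x0 (min y0 y1) (max y0 y1) false
    else if y0 == y1 then pathCells y0 (min x0 x1) (max x0 x1) true
    else []
  -- for polje in polja_vmes: if polje in mine: return False / return True
  !(polja_vmes.any (fun polje => mine.contains polje))

-- ===== PORT B =====
def varen_premik_alt (x0 : Int) (y0 : Int) (x1 : Int) (y1 : Int) (mine : List (Int × Int)) : Bool :=
  if x0 == x1 then
    !(mine.any (fun m => m.1 == x0 && decide (min y0 y1 ≤ m.2) && decide (m.2 ≤ max y0 y1)))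
  else if y0 == y1 then
    !(mine.any (fun m => m.2 == y0 && decide (min x0 x1 ≤ m.1) && decide (m.1 ≤ max x0 x1)))
  else true

-- ===== PRECONDITION & SPEC =====
def Spec_varen_premik (x0 : Int) (y0 : Int) (x1 : Int) (y1 : Int) (mine : List (Int × Int)) (out : Bool) : Prop := out = varen_premik_alt x0 y0 x1 y1 mine
instance (x0 : Int) (y0 : Int) (x1 : Int) (y1 : Int) (mine : List (Int × Int)) (out : Bool) : Decidable (Spec_varen_premik x0 y0 x1 y1 mine out) := by unfold Spec_varen_premik; infer_instance

-- ===== CLAIM (what is proved, stated in full; the proofs are below) =====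
def Claim_equal_varen_premik : Prop := ∀ (x0 : Int) (y0 : Int) (x1 : Int) (y1 : Int) (mine : List (Int × Int)), Dom_varen_premik x0 y0 x1 y1 mine → Spec_varen_premik x0 y0 x1 y1 mine (varen_premik x0 y0 x1 y1 mine)

-- ===== LEMMAS AND PROOFS =====
lemma mem_pathCells (x b : Int) (h : Bool) (p : Int × Int) (a : Int) :
    p ∈ pathCells x a b h ↔
      (if h then p.2 = x ∧ a ≤ p.1 ∧ p.1 ≤ b else p.1 = x ∧ a ≤ p.2 ∧ p.2 ≤ b) := by
  induction a using pathCells.induct (vecji := b) with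
  | case1 a hle ih =>
    rw [pathCells]
    simp only [hle, dif_pos, List.mem_cons, ih]
    obtain ⟨p1, p2⟩ := p
    cases h <;> simp [Prod.ext_iff] <;> constructor <;>
      (intro hyp; try rcases hyp with hyp | hyp) <;> omega
  | case2 a hle =>
    rw [pathCells]
    simp only [hle]
    cases h <;> simp <;> omega

lemma any_path_eq_any_mine (x a b : Int) (h : Bool) (mine : List (Int × Int)) :
    (pathCells x a b h).any (fun p => mine.contains p) =
      mine.any (fun m => (if h then m.2 == x && decide (a ≤ m.1) && decide (m.1 ≤ b)
                          else m.1 == x && decide (a ≤ m.2) && decide (m.2 ≤ b))) := by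
  rw [Bool.eq_iff_iff, List.any_eq_true, List.any_eq_true]
  constructor
  · rintro ⟨p, hp, hpm⟩
    rw [mem_pathCells] at hp
    simp only [List.contains_iff_mem] at hpm
    refine ⟨p, hpm, ?_⟩
    cases h <;> simp_all
  · rintro ⟨m, hm, hpm⟩
    refine ⟨m, ?_, by simp [hm]⟩
    rw [mem_pathCells]
    cases h <;> simp_all

lemma any_path_false (x a b : Int) (mine : List (Int × Int)) :
    (pathCells x a b false).any (fun p => mine.contains p) =
      mine.any (fun m => m.1 == x && decide (a ≤ m.2) && decide (m.2 ≤ b)) := by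
  simpa using any_path_eq_any_mine x a b false mine

lemma any_path_true (x a b : Int) (mine : List (Int × Int)) :
    (pathCells x a b true).any (fun p => mine.contains p) =
      mine.any (fun m => m.2 == x && decide (a ≤ m.1) && decide (m.1 ≤ b)) := by
  simpa using any_path_eq_any_mine x a b true mine

-- ===== VERDICT (by name: the statement is the Claim_ definition above) =====
theorem varen_premik_spec : Claim_equal_varen_premik := by
  intro x0 y0 x1 y1 mine _hdom
  unfold Spec_varen_premik varen_premik varen_premik_alt
  simp only []
  split_ifs with hx hy
  · rw [any_path_false]
  · rw [any_path_true]
  · simp
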